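-- pv_equiv track=rewrite | github.com/matialegre/ERP-Indumentaria | _apply_pg_rewrite.py | _replace_q_in_sql_strings
-- ===== SOURCE A (Python) =====
-- def _replace_q_in_sql_strings(text: str) -> str:
--     out = []
--     i = 0
--     n = len(text)
--     while i < n:
--         # detectar inicio de triple-quoted string
--         if text[i:i+3] in ('"""', "'''"):
--             quote = text[i:i+3]
--             j = text.find(quote, i + 3)
--             if j == -1:
--                 out.append(text[i:])
--                 break
--             block = text[i:j+3]
--             block = block.replace('?', '%s')
--             out.append(block)
--             i = j + 3
--         else:
--             out.append(text[i])
--             i += 1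
--     return ''.join(out)
-- ===== SOURCE B (Python) =====
-- def _replace_q_in_sql_strings(text: str) -> str:
--     out = []
--     pos = 0
--     while True:
--         i1 = text.find('"""', pos)
--         i2 = text.find("'''", pos)
--         starts = [x for x in (i1, i2) if x != -1]
--         if not starts:
--             out.append(text[pos:])
--             break
--         start = min(starts)
--         quote = '"""' if start == i1 else "'''"
--         out.append(text[pos:start])
--         close = text.find(quote, start + 3)
--         if close == -1:
--             out.append(text[start:])
--             break
--         out.append(text[start:close + 3].replace('?', '%s'))
--         pos = close + 3
--     return ''.join(out)
-- ===== Notes on version B (the rewrite author's own statement) =====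
-- stated objective: faster
-- what changed: Replaced A's per-character while-loop (checking text[i:i+3] at every index and appending single characters) by a find-based segment loop that locates the earliest triple-quote delimiter with two str.find calls, bulk-copies the untouched text before it, and processes whole quoted blocks.
import Mathlib
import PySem

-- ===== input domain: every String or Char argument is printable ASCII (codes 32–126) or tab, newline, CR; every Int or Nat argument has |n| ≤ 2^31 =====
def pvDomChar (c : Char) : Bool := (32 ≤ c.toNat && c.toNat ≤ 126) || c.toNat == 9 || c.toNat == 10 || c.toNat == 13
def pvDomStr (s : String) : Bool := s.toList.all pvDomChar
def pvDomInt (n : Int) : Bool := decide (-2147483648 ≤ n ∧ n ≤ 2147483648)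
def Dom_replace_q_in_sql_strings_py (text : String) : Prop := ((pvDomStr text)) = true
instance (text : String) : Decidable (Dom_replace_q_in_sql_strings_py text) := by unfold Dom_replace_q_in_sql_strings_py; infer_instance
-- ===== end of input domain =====

-- B replaces A's per-character scan by a find-based per-segment loop (bulk copies between
-- delimiters); objective: faster by a constant factor (C-level scans), identical return value.

-- ===== PORT A =====
-- 'block.replace('?', '%s')' character-wise
def pvRepl (c : Char) : List Char := if c = '?' then ['%', 's'] else [c]

-- does the list start with quote*3 ? (Python: text[i:i+3] in ('"""', "'''") for one quote kind)
def pvTripleAt (q : Char) : List Char → Bool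
  | a :: b :: c :: _ => a = q && b = q && c = q
  | _ => false

-- Python: text[i:i+3] in ('"""', "'''"), returning the matching quote character
def pvIsTq (l : List Char) : Option Char :=
  if pvTripleAt '"' l then some '"'
  else if pvTripleAt '\'' l then some '\'' else none

-- Python: text.find(quote, i) relative to the suffix; offset of first triple-quote occurrence
def pvFindTriple (q : Char) : List Char → Option Nat
  | [] => none
  | c :: cs =>
    if pvTripleAt q (c :: cs) then some 0
    else (pvFindTriple q cs).map (· + 1)

-- the while-loop of A: one character at a time, quoted block handled when found at i
def pvGoA : List Char → List Char
  | [] => []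
  | c :: cs =>
    match pvIsTq (c :: cs) with
    | some q =>
      match pvFindTriple q ((c :: cs).drop 3) with
      | none => c :: cs
      | some k =>
        ((c :: cs).take (k + 6)).flatMap pvRepl ++ pvGoA ((c :: cs).drop (k + 6))
    | none => c :: pvGoA cs
  termination_by l => l.length
  decreasing_by
  · simp [List.length_drop]
  · simp

def replace_q_in_sql_strings_py (text : String) : String :=
  String.ofList (pvGoA text.toList)

-- ===== PORT B =====
-- B: start = min of the found positions, quote = '"""' if start == i1 else "'''"
def pvPick : Option Nat → Option Nat → Option (Nat × Char)
  | none, none => none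
  | some a, none => some (a, '"')
  | none, some b => some (b, '\'')
  | some a, some b => if a ≤ b then some (a, '"') else some (b, '\'')

theorem pvFindTriple_le {q : Char} {l : List Char} {k : Nat}
    (h : pvFindTriple q l = some k) : k + 3 ≤ l.length := by
  induction l generalizing k with
  | nil => simp [pvFindTriple] at h
  | cons c cs ih =>
    simp only [pvFindTriple] at h
    split at h
    · rename_i hT
      cases h
      cases cs with
      | nil => simp [pvTripleAt] at hT
      | cons b bs =>
        cases bs with
        | nil => simp [pvTripleAt] at hT
        | cons d ds => simp
    · rcases Option.map_eq_some_iff.mp h with ⟨k', hk', rfl⟩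
      have := ih hk'
      simp; omega

theorem pvPick_le {l : List Char} {s : Nat} {q : Char}
    (h : pvPick (pvFindTriple '"' l) (pvFindTriple '\'' l) = some (s, q)) :
    s + 3 ≤ l.length := by
  rcases h1 : pvFindTriple '"' l with _ | a <;> rcases h2 : pvFindTriple '\'' l with _ | b <;>
      rw [h1, h2] at h <;> simp only [pvPick] at h
  case none.none => simp at h
  case none.some => cases h; exact pvFindTriple_le h2
  case some.none => cases h; exact pvFindTriple_le h1
  case some.some =>
    split at h <;> cases h
    · exact pvFindTriple_le h1
    · exact pvFindTriple_le h2

-- the while-loop of B: per-segment bulk copy up to the next delimiter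
def pvGoB (l : List Char) : List Char :=
  match h : pvPick (pvFindTriple '"' l) (pvFindTriple '\'' l) with
  | none => l
  | some (s, q) =>
    match pvFindTriple q (l.drop (s + 3)) with
    | none => l.take s ++ l.drop s
    | some k =>
      l.take s ++ ((l.drop s).take (k + 6)).flatMap pvRepl ++ pvGoB (l.drop (s + (k + 6)))
  termination_by l.length
  decreasing_by
    have := pvPick_le h
    simp [List.length_drop]; omega

def replace_q_in_sql_strings_py_alt (text : String) : String :=
  String.ofList (pvGoB text.toList)

-- ===== PRECONDITION & SPEC =====
def Spec_replace_q_in_sql_strings_py (text : String) (out : String) : Prop := out = replace_q_in_sql_strings_py_alt text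
instance (text : String) (out : String) : Decidable (Spec_replace_q_in_sql_strings_py text out) := by unfold Spec_replace_q_in_sql_strings_py; infer_instance

-- ===== CLAIM (what is proved, stated in full; the proofs are below) =====
def Claim_equal_replace_q_in_sql_strings_py : Prop := ∀ (text : String), Dom_replace_q_in_sql_strings_py text → Spec_replace_q_in_sql_strings_py text (replace_q_in_sql_strings_py text)

-- ===== LEMMAS AND PROOFS =====

theorem pvFindTriple_hit {q : Char} {l : List Char} {k : Nat}
    (h : pvFindTriple q l = some k) : pvTripleAt q (l.drop k) = true := by
  induction l generalizing k with
  | nil => simp [pvFindTriple] at h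
  | cons c cs ih =>
    simp only [pvFindTriple] at h
    split at h
    · cases h; simpa using ‹_›
    · rcases Option.map_eq_some_iff.mp h with ⟨k', hk', rfl⟩
      rw [List.drop_succ_cons]; exact ih hk'

theorem pvFindTriple_min {q : Char} {l : List Char} {k : Nat}
    (h : pvFindTriple q l = some k) :
    ∀ t, t < k → pvTripleAt q (l.drop t) = false := by
  induction l generalizing k with
  | nil => intro t ht; simp [pvFindTriple] at h
  | cons c cs ih =>
    intro t ht
    simp only [pvFindTriple] at h
    split at h
    · cases h; omega
    · rcases Option.map_eq_some_iff.mp h with ⟨k', hk', rfl⟩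
      cases t with
      | zero => rename_i hT; simpa using hT
      | succ t => rw [List.drop_succ_cons]; exact ih hk' t (by omega)

theorem pvFindTriple_none {q : Char} {l : List Char}
    (h : pvFindTriple q l = none) :
    ∀ t, pvTripleAt q (l.drop t) = false := by
  induction l with
  | nil => intro t; simp [List.drop_nil, pvTripleAt]
  | cons c cs ih =>
    intro t
    simp only [pvFindTriple] at h
    split at h
    · simp at h
    · rename_i hT
      cases t with
      | zero => simpa using hT
      | succ t => rw [List.drop_succ_cons]; exact ih (Option.map_eq_none_iff.mp h) t

theorem pvPick_none_isTq {l : List Char}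
    (h1 : pvFindTriple '"' l = none) (h2 : pvFindTriple '\'' l = none) :
    ∀ t, pvIsTq (l.drop t) = none := fun t => by
  simp [pvIsTq, pvFindTriple_none h1 t, pvFindTriple_none h2 t]

theorem pvPick_spec {l : List Char} {s : Nat} {q : Char}
    (h : pvPick (pvFindTriple '"' l) (pvFindTriple '\'' l) = some (s, q)) :
    pvIsTq (l.drop s) = some q ∧ ∀ t, t < s → pvIsTq (l.drop t) = none := by
  rcases h1 : pvFindTriple '"' l with _ | a <;> rcases h2 : pvFindTriple '\'' l with _ | b <;>
      rw [h1, h2] at h <;> simp only [pvPick] at h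
  case none.none => simp at h
  case none.some =>
    cases h
    refine ⟨by simp [pvIsTq, pvFindTriple_hit h2, pvFindTriple_none h1 s], ?_⟩
    intro t ht
    simp [pvIsTq, pvFindTriple_none h1 t, pvFindTriple_min h2 t ht]
  case some.none =>
    cases h
    refine ⟨by simp [pvIsTq, pvFindTriple_hit h1], ?_⟩
    intro t ht
    simp [pvIsTq, pvFindTriple_min h1 t ht, pvFindTriple_none h2 t]
  case some.some =>
    split at h <;> cases h
    · rename_i hab
      refine ⟨by simp [pvIsTq, pvFindTriple_hit h1], ?_⟩
      intro t ht
      simp [pvIsTq, pvFindTriple_min h1 t ht, pvFindTriple_min h2 t (by omega)]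
    · rename_i hab
      refine ⟨by simp [pvIsTq, pvFindTriple_hit h2,
          pvFindTriple_min h1 s (by omega)], ?_⟩
      intro t ht
      simp [pvIsTq, pvFindTriple_min h1 t (by omega), pvFindTriple_min h2 t ht]

theorem pvGoA_copy : ∀ (s : Nat) (l : List Char),
    (∀ t, t < s → pvIsTq (l.drop t) = none) →
    pvGoA l = l.take s ++ pvGoA (l.drop s) := by
  intro s
  induction s with
  | zero => intro l _; simp
  | succ s ih =>
    intro l h
    cases l with
    | nil => simp
    | cons c cs =>
      have h0 : pvIsTq (c :: cs) = none := by simpa using h 0 (Nat.succ_pos s)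
      rw [pvGoA, h0, List.take_succ_cons, List.drop_succ_cons, List.cons_append]
      exact congrArg (c :: ·) (ih cs fun t ht => by
        simpa [List.drop_succ_cons] using h (t + 1) (by omega))

theorem pvGoA_id {l : List Char} (h : ∀ t, pvIsTq (l.drop t) = none) :
    pvGoA l = l := by
  rw [pvGoA_copy l.length l (fun t _ => h t)]
  simp [pvGoA]

theorem pvGoA_goB : ∀ (n : Nat) (l : List Char), l.length ≤ n → pvGoA l = pvGoB l := by
  intro n
  induction n with
  | zero =>
    intro l hl
    have : l = [] := List.eq_nil_of_length_eq_zero (Nat.le_zero.mp hl)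
    subst this
    simp [pvGoA, pvGoB, pvFindTriple, pvPick]
  | succ n ih =>
    intro l hl
    rw [pvGoB.eq_def]
    split
    · rename_i hp
      rcases h1 : pvFindTriple '"' l with _ | a <;> rcases h2 : pvFindTriple '\'' l with _ | b <;>
          rw [h1, h2] at hp <;> simp only [pvPick] at hp
      · exact pvGoA_id (pvPick_none_isTq h1 h2)
      · simp at hp
      · simp at hp
      · split at hp <;> simp at hp
    · rename_i s q hp
      obtain ⟨hq, hmin⟩ := pvPick_spec hp
      obtain ⟨c, cs, hds⟩ : ∃ c cs, l.drop s = c :: cs := by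
        cases hd : l.drop s with
        | nil => rw [hd] at hq; simp [pvIsTq, pvTripleAt] at hq
        | cons c cs => exact ⟨c, cs, rfl⟩
      have hq' : pvIsTq (c :: cs) = some q := hds ▸ hq
      have hd3 : (c :: cs).drop 3 = l.drop (s + 3) := by
        rw [← hds, List.drop_drop]
      split
      · rename_i hfc
        rw [pvGoA_copy s l hmin, hds, pvGoA, hq', hd3]
        simp only [hfc]
      · rename_i k hfc
        rw [pvGoA_copy s l hmin, hds, pvGoA, hq', hd3]
        simp only [hfc]
        rw [← hds]
        have hdk : (l.drop s).drop (k + 6) = l.drop (s + (k + 6)) := by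
          rw [List.drop_drop]
        rw [hdk, ih (l.drop (s + (k + 6))) (by simp [List.length_drop]; omega),
          List.append_assoc]

-- ===== VERDICT (by name: the statement is the Claim_ definition above) =====
theorem replace_q_in_sql_strings_py_spec : Claim_equal_replace_q_in_sql_strings_py := by
  intro text _
  unfold Spec_replace_q_in_sql_strings_py replace_q_in_sql_strings_py replace_q_in_sql_strings_py_alt
  rw [pvGoA_goB text.toList.length text.toList (Nat.le_refl _)]
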